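-- pv_equiv track=rewrite | github.com/IDEA-FinAI/RRR-KGC | reasoning.py | load_few_shot
-- ===== SOURCE A (Python) =====
-- def load_few_shot(cur_entity, relation, train_set, count, forward):
--     few_shot_pairs = []
--
--     if relation in train_set:
--         for h, t in train_set[relation]:
--             if (forward and h == cur_entity) or (not forward and t == cur_entity):
--                 few_shot_pairs.append((h, t))
--                 if len(few_shot_pairs) >= count:
--                     return few_shot_pairs
--
--         for h, t in train_set[relation]:
--             if (h, t) not in few_shot_pairs:
--                 few_shot_pairs.append((h, t))
--                 if len(few_shot_pairs) >= count:
--                     return few_shot_pairs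
--
--     return few_shot_pairs
-- ===== SOURCE B (Python) =====
-- def load_few_shot(cur_entity, relation, train_set, count, forward):
--     if relation not in train_set:
--         return []
--     matched, remainder, seen = [], [], set()
--     for h, t in train_set[relation]:
--         if h == cur_entity if forward else t == cur_entity:
--             matched.append((h, t))
--         elif (h, t) not in seen:
--             remainder.append((h, t))
--             seen.add((h, t))
--     return (matched + remainder)[:count]
-- ===== Notes on version B (the rewrite author's own statement) =====
-- stated objective: alternative
-- what changed: Replaces A's two passes with in-loop early returns (the second deduplicating against the growing result list) by a single classifying pass into matched/remainder lists with a seen-set, followed by one slice combined[:count]; Pre_ restricts to the natural domain count >= 0, where negative counts make both A's one-pair result and Python's from-the-end slice accidental.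
-- intended difference: When count = 0 and the relation is present with a nonempty pair list, A returns one pair (its len>=count check only fires after an append) while B returns [], which is the intended result of asking for zero few-shot examples. — e.g. on load_few_shot("a", "r", [("r", [("a", "b")])], 0, true): A returns [("a", "b")], B returns []
-- outside the precondition, e.g. on load_few_shot('', '', {'': [('', 'a'), ('', 'b')]}, -2, True): A returns [('', 'a')], B returns []
import Mathlib
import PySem

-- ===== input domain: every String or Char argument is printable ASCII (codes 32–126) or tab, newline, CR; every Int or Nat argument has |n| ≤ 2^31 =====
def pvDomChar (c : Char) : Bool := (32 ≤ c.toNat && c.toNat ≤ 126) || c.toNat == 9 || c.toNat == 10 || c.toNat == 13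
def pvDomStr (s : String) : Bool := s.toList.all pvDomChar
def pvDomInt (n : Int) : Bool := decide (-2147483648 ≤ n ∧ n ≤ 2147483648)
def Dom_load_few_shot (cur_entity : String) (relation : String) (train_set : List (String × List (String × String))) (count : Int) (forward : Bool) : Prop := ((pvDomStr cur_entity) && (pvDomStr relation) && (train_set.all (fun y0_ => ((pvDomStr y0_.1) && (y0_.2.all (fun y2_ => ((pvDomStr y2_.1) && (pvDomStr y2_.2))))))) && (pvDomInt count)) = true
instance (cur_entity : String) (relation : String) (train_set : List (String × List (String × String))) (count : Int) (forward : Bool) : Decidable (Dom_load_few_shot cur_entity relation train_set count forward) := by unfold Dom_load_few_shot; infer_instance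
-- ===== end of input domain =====

-- B replaces A's two early-returning passes by one classifying pass with a seen-set plus one slice (alternative decomposition, same cost); B returns [] when count = 0, where A accidentally returns one pair.



-- ===== PORT A =====
-- first loop of A: append matching pairs, early return (.inl) once len(few_shot_pairs) >= count
def pvLoopA1 (cur_entity : String) (forward : Bool) (count : Int) :
    List (String × String) → List (String × String) →
    Sum (List (String × String)) (List (String × String))
  | [], fsp => .inr fsp
  | (h, t) :: rest, fsp =>
    if (forward && h == cur_entity) || (!forward && t == cur_entity) then
      let fsp' := fsp ++ [(h, t)]
      if count ≤ (fsp'.length : Int) then .inl fsp'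
      else pvLoopA1 cur_entity forward count rest fsp'
    else pvLoopA1 cur_entity forward count rest fsp

-- second loop of A: append pairs not already collected, same early return
def pvLoopA2 (count : Int) :
    List (String × String) → List (String × String) →
    Sum (List (String × String)) (List (String × String))
  | [], fsp => .inr fsp
  | p :: rest, fsp =>
    if fsp.contains p then pvLoopA2 count rest fsp
    else
      let fsp' := fsp ++ [p]
      if count ≤ (fsp'.length : Int) then .inl fsp'
      else pvLoopA2 count rest fsp'

def load_few_shot (cur_entity : String) (relation : String) (train_set : List (String × List (String × String))) (count : Int) (forward : Bool) : List (String × String) :=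
  match (PySem.Dict.mk train_set).get? relation with
  | none => []   -- 'relation in train_set' is false: return few_shot_pairs = []
  | some pairs =>
    match pvLoopA1 cur_entity forward count pairs [] with
    | .inl r => r
    | .inr fsp =>
      match pvLoopA2 count pairs fsp with
      | .inl r => r
      | .inr fsp2 => fsp2

-- ===== PORT B =====
-- B's single pass: classify each pair as matched (duplicates kept) or, if unseen, remainder
def pvClassifyB (cur_entity : String) (forward : Bool) :
    List (String × String) → List (String × String) → List (String × String) →
    PySem.Set (String × String) → List (String × String) × List (String × String)
  | [], m, r, _ => (m, r)
  | (h, t) :: rest, m, r, seen =>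
    if (if forward then h == cur_entity else t == cur_entity) then
      pvClassifyB cur_entity forward rest (m ++ [(h, t)]) r seen
    else if PySem.Set.contains seen (h, t) then
      pvClassifyB cur_entity forward rest m r seen
    else
      pvClassifyB cur_entity forward rest m (r ++ [(h, t)]) (PySem.Set.add seen (h, t))

def load_few_shot_alt (cur_entity : String) (relation : String) (train_set : List (String × List (String × String))) (count : Int) (forward : Bool) : List (String × String) :=
  match (PySem.Dict.mk train_set).get? relation with
  | none => []
  | some pairs =>
    let mr := pvClassifyB cur_entity forward pairs [] [] PySem.Set.empty
    PySem.List.slice (mr.1 ++ mr.2) none (some count)   -- (matched + remainder)[:count]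

-- ===== PRECONDITION & SPEC =====
-- Pre_ restricts to the function's natural domain count ≥ 0: on negative counts A still returns a value,
-- but it is an artefact of its post-append len>=count check (one pair regardless of count), while B's
-- Python slice [:count] drops |count| pairs from the end; neither value is the specified one.
def Pre_load_few_shot (cur_entity : String) (relation : String) (train_set : List (String × List (String × String))) (count : Int) (forward : Bool) : Prop := 0 ≤ count
instance (cur_entity : String) (relation : String) (train_set : List (String × List (String × String))) (count : Int) (forward : Bool) : Decidable (Pre_load_few_shot cur_entity relation train_set count forward) := by unfold Pre_load_few_shot; infer_instance

def pvWitness_load_few_shot : String × String × (List (String × List (String × String))) × Int × Bool :=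
  ("a", "r", [("r", [("a", "b"), ("c", "d")])], 2, true)

-- When count = 0 and the relation's pair list is nonempty, A returns one pair (its len>=count check only
-- fires after an append), while B returns []: asking for zero few-shot examples should yield none.
def D_load_few_shot (cur_entity : String) (relation : String) (train_set : List (String × List (String × String))) (count : Int) (forward : Bool) : Prop :=
  count = 0 ∧ ((PySem.Dict.mk train_set).get? relation).getD [] ≠ []
instance (cur_entity : String) (relation : String) (train_set : List (String × List (String × String))) (count : Int) (forward : Bool) : Decidable (D_load_few_shot cur_entity relation train_set count forward) := by unfold D_load_few_shot; infer_instance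

def Spec_load_few_shot (cur_entity : String) (relation : String) (train_set : List (String × List (String × String))) (count : Int) (forward : Bool) (out : List (String × String)) : Prop := ¬ D_load_few_shot cur_entity relation train_set count forward → out = load_few_shot_alt cur_entity relation train_set count forward
instance (cur_entity : String) (relation : String) (train_set : List (String × List (String × String))) (count : Int) (forward : Bool) (out : List (String × String)) : Decidable (Spec_load_few_shot cur_entity relation train_set count forward out) := by unfold Spec_load_few_shot; infer_instance

def pvDiffWitness_load_few_shot : String × String × (List (String × List (String × String))) × Int × Bool :=
  ("a", "r", [("r", [("a", "b")])], 0, true)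
def pvDiffWitnessOut_load_few_shot : (List (String × String)) × (List (String × String)) :=
  ([("a", "b")], [])

-- ===== CLAIM (what is proved, stated in full; the proofs are below) =====
def Claim_unchanged_load_few_shot : Prop := ∀ (cur_entity : String) (relation : String) (train_set : List (String × List (String × String))) (count : Int) (forward : Bool), Dom_load_few_shot cur_entity relation train_set count forward → Pre_load_few_shot cur_entity relation train_set count forward → Spec_load_few_shot cur_entity relation train_set count forward (load_few_shot cur_entity relation train_set count forward)
def Claim_changed_load_few_shot : Prop := Dom_load_few_shot (pvDiffWitness_load_few_shot.1) (pvDiffWitness_load_few_shot.2.1) (pvDiffWitness_load_few_shot.2.2.1) (pvDiffWitness_load_few_shot.2.2.2.1) (pvDiffWitness_load_few_shot.2.2.2.2) ∧ Pre_load_few_shot (pvDiffWitness_load_few_shot.1) (pvDiffWitness_load_few_shot.2.1) (pvDiffWitness_load_few_shot.2.2.1) (pvDiffWitness_load_few_shot.2.2.2.1) (pvDiffWitness_load_few_shot.2.2.2.2) ∧ D_load_few_shot (pvDiffWitness_load_few_shot.1) (pvDiffWitness_load_few_shot.2.1) (pvDiffWitness_load_few_shot.2.2.1) (pvDiffWitness_load_few_shot.2.2.2.1)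 (pvDiffWitness_load_few_shot.2.2.2.2) ∧ load_few_shot (pvDiffWitness_load_few_shot.1) (pvDiffWitness_load_few_shot.2.1) (pvDiffWitness_load_few_shot.2.2.1) (pvDiffWitness_load_few_shot.2.2.2.1) (pvDiffWitness_load_few_shot.2.2.2.2) = pvDiffWitnessOut_load_few_shot.1 ∧ load_few_shot_alt (pvDiffWitness_load_few_shot.1) (pvDiffWitness_load_few_shot.2.1) (pvDiffWitness_load_few_shot.2.2.1) (pvDiffWitness_load_few_shot.2.2.2.1) (pvDiffWitness_load_few_shot.2.2.2.2) = pvDiffWitnessOut_load_few_shot.2 ∧ pvDiffWitnessOut_load_few_shot.1 ≠ pvDiffWitnessOut_load_few_shot.2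
def Claim_exact_load_few_shot : Prop := ∀ (cur_entity : String) (relation : String) (train_set : List (String × List (String × String))) (count : Int) (forward : Bool), Dom_load_few_shot cur_entity relation train_set count forward → Pre_load_few_shot cur_entity relation train_set count forward → D_load_few_shot cur_entity relation train_set count forward → load_few_shot cur_entity relation train_set count forward ≠ load_few_shot_alt cur_entity relation train_set count forward

-- ===== LEMMAS AND PROOFS =====

-- the match condition, as B writes it
def pvCond (cur_entity : String) (forward : Bool) (p : String × String) : Bool :=
  if forward then p.1 == cur_entity else p.2 == cur_entity

theorem pvCond_eq (cur_entity : String) (forward : Bool) (h t : String) :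
    ((forward && h == cur_entity) || (!forward && t == cur_entity)) = pvCond cur_entity forward (h, t) := by
  cases forward <;> simp [pvCond]

-- functional spec of the deduplicated remainder
def pvRemSpec (cond : (String × String) → Bool) :
    List (String × String) → PySem.Set (String × String) → List (String × String)
  | [], _ => []
  | p :: rest, seen =>
    if cond p then pvRemSpec cond rest seen
    else if PySem.Set.contains seen p then pvRemSpec cond rest seen
    else p :: pvRemSpec cond rest (PySem.Set.add seen p)

theorem pvClassifyB_spec (cur_entity : String) (forward : Bool) :
    ∀ (l m r : List (String × String)) (seen : PySem.Set (String × String)),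
      pvClassifyB cur_entity forward l m r seen =
        (m ++ l.filter (pvCond cur_entity forward), r ++ pvRemSpec (pvCond cur_entity forward) l seen) := by
  intro l
  induction l with
  | nil => intro m r seen; simp [pvClassifyB, pvRemSpec]
  | cons p rest ih =>
    obtain ⟨h, t⟩ := p
    intro m r seen
    rw [pvClassifyB, pvRemSpec]
    by_cases hc : pvCond cur_entity forward (h, t) = true
    · have hc' : (if forward then h == cur_entity else t == cur_entity) = true := by
        simpa [pvCond] using hc
      rw [hc', if_pos rfl, if_pos hc, ih, List.filter_cons_of_pos hc]
      simp
    · have hcf : pvCond cur_entity forward (h, t) = false := by simpa using hc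
      have hc' : (if forward then h == cur_entity else t == cur_entity) = false := by
        simpa [pvCond] using hcf
      rw [hc', if_neg (by simp)]
      by_cases hs : (h, t) ∈ seen
      · have hsc : PySem.Set.contains seen (h, t) = true := by
          rw [PySem.Set.contains_iff]; exact hs
        rw [if_pos hsc, ih, if_neg (by simp [hcf]), if_pos hsc,
          List.filter_cons_of_neg (by simp [hcf])]
      · have hsc : PySem.Set.contains seen (h, t) = false := by
          rw [Bool.eq_false_iff]
          intro hx
          exact hs ((PySem.Set.contains_iff (s := seen) (x := (h, t))).mp hx)
        rw [if_neg (by simp; exact hs), ih, if_neg (by simp [hcf]), if_neg (by simp; exact hs),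
          List.filter_cons_of_neg (by simp [hcf])]
        simp

-- A's second loop without early returns
def pvFull2 : List (String × String) → List (String × String) → List (String × String)
  | [], fsp => fsp
  | p :: rest, fsp => if fsp.contains p then pvFull2 rest fsp else pvFull2 rest (fsp ++ [p])

def pvK (count : Int) (n : Nat) : Nat := max count.toNat (n + 1)

theorem pvLoopA1_spec (cur_entity : String) (forward : Bool) (count : Int) :
    ∀ (l fsp : List (String × String)),
      pvLoopA1 cur_entity forward count l fsp =
        (if pvK count fsp.length ≤ (fsp ++ l.filter (pvCond cur_entity forward)).length
         then .inl ((fsp ++ l.filter (pvCond cur_entity forward)).take (pvK count fsp.length))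
         else .inr (fsp ++ l.filter (pvCond cur_entity forward))) := by
  intro l
  induction l with
  | nil =>
    intro fsp
    have hn : ¬ pvK count fsp.length ≤ (fsp ++ List.filter (pvCond cur_entity forward) []).length := by
      simp only [List.filter_nil, List.append_nil, pvK]
      omega
    rw [pvLoopA1, if_neg hn]
    simp
  | cons p rest ih =>
    obtain ⟨h, t⟩ := p
    intro fsp
    by_cases hc : pvCond cur_entity forward (h, t) = true
    · rw [pvLoopA1, pvCond_eq cur_entity forward h t, hc, if_pos rfl]
      by_cases hcnt : count ≤ ((fsp ++ [(h, t)]).length : Int)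
      · have hK : pvK count fsp.length = fsp.length + 1 := by
          simp only [List.length_append, List.length_cons, List.length_nil] at hcnt
          simp only [pvK]; omega
        have hF : fsp ++ ((h, t) :: rest).filter (pvCond cur_entity forward)
            = (fsp ++ [(h, t)]) ++ rest.filter (pvCond cur_entity forward) := by
          simp [hc]
        have hlen2 : pvK count fsp.length ≤ (fsp ++ ((h, t) :: rest).filter (pvCond cur_entity forward)).length := by
          rw [hF, hK]; simp
        have hl : (fsp ++ [(h, t)]).length = fsp.length + 1 := by simp
        rw [if_pos hcnt, if_pos hlen2, hF, hK, ← hl, List.take_left]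
      · have hK : pvK count (fsp ++ [(h, t)]).length = pvK count fsp.length := by
          simp only [List.length_append, List.length_cons, List.length_nil] at hcnt
          simp only [pvK, List.length_append, List.length_cons, List.length_nil]; omega
        have hF : (fsp ++ [(h, t)]) ++ rest.filter (pvCond cur_entity forward)
            = fsp ++ ((h, t) :: rest).filter (pvCond cur_entity forward) := by
          simp [hc]
        rw [if_neg hcnt, ih, hK, hF]
    · have hcf : pvCond cur_entity forward (h, t) = false := by simpa using hc
      have hF : fsp ++ rest.filter (pvCond cur_entity forward)
          = fsp ++ ((h, t) :: rest).filter (pvCond cur_entity forward) := by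
        simp [hcf]
      rw [pvLoopA1, pvCond_eq cur_entity forward h t, hcf, if_neg (by simp), ih, hF]

theorem pvFull2_prefix : ∀ (l fsp : List (String × String)), fsp <+: pvFull2 l fsp := by
  intro l
  induction l with
  | nil => intro fsp; rw [pvFull2]
  | cons p rest ih =>
    intro fsp
    rw [pvFull2]
    by_cases hp : fsp.contains p = true
    · rw [if_pos hp]; exact ih fsp
    · rw [if_neg hp]
      exact (fsp.prefix_append [p]).trans (ih (fsp ++ [p]))

theorem pvLoopA2_spec (count : Int) :
    ∀ (l fsp : List (String × String)),
      pvLoopA2 count l fsp =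
        (if pvK count fsp.length ≤ (pvFull2 l fsp).length
         then .inl ((pvFull2 l fsp).take (pvK count fsp.length))
         else .inr (pvFull2 l fsp)) := by
  intro l
  induction l with
  | nil =>
    intro fsp
    have hn : ¬ pvK count fsp.length ≤ (pvFull2 [] fsp).length := by
      rw [pvFull2]; simp only [pvK]; omega
    rw [pvLoopA2, pvFull2, if_neg (by rw [pvFull2] at hn; exact hn)]
  | cons p rest ih =>
    intro fsp
    rw [pvLoopA2, pvFull2]
    by_cases hp : fsp.contains p = true
    · rw [if_pos hp, if_pos hp, ih]
    · rw [if_neg hp, if_neg hp]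
      by_cases hcnt : count ≤ ((fsp ++ [p]).length : Int)
      · have hK : pvK count fsp.length = fsp.length + 1 := by
          simp only [List.length_append, List.length_cons, List.length_nil] at hcnt
          simp only [pvK]; omega
        obtain ⟨s, hs⟩ := pvFull2_prefix rest (fsp ++ [p])
        have hlen2 : pvK count fsp.length ≤ (pvFull2 rest (fsp ++ [p])).length := by
          rw [← hs, hK]; simp
        have hl : (fsp ++ [p]).length = fsp.length + 1 := by simp
        rw [if_pos hcnt, if_pos hlen2, ← hs, hK, ← hl, List.take_left]
      · have hK : pvK count (fsp ++ [p]).length = pvK count fsp.length := by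
          simp only [List.length_append, List.length_cons, List.length_nil] at hcnt
          simp only [pvK, List.length_append, List.length_cons, List.length_nil]; omega
        rw [if_neg hcnt, ih, hK]

theorem pvFull2_remSpec (cond : (String × String) → Bool) :
    ∀ (l acc : List (String × String)) (seen : PySem.Set (String × String)),
      (∀ p ∈ l, cond p = true → p ∈ acc) →
      (∀ p, cond p = false → (p ∈ acc ↔ p ∈ seen)) →
      pvFull2 l acc = acc ++ pvRemSpec cond l seen := by
  intro l
  induction l with
  | nil => intro acc seen _ _; simp [pvFull2, pvRemSpec]
  | cons p rest ih =>
    intro acc seen h1 h2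
    rw [pvFull2, pvRemSpec]
    by_cases hc : cond p = true
    · have hmem : p ∈ acc := h1 p (by simp) hc
      have hacc : acc.contains p = true := by simpa using hmem
      rw [if_pos hacc, if_pos hc]
      exact ih acc seen (fun q hq hcq => h1 q (by simp [hq]) hcq) h2
    · have hc' : cond p = false := by simpa using hc
      rw [if_neg hc]
      by_cases hs : p ∈ seen
      · have hmem : p ∈ acc := ((h2 p hc').mpr hs)
        have hacc : acc.contains p = true := by simpa using hmem
        have hsc : PySem.Set.contains seen p = true := by
          rw [PySem.Set.contains_iff]; exact hs
        rw [if_pos hacc, if_pos hsc]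
        exact ih acc seen (fun q hq hcq => h1 q (by simp [hq]) hcq) h2
      · have hmem : p ∉ acc := fun h => hs ((h2 p hc').mp h)
        have hacc : ¬ acc.contains p = true := by simpa using hmem
        have hsc : ¬ PySem.Set.contains seen p = true := by
          rw [PySem.Set.contains_iff]; exact hs
        rw [if_neg hacc, if_neg hsc]
        rw [ih (acc ++ [p]) (PySem.Set.add seen p)
          (fun q hq hcq => by simp [h1 q (by simp [hq]) hcq])
          (fun q hcq => by
            rw [PySem.Set.mem_add]
            constructor
            · intro hq
              rcases List.mem_append.mp hq with h | h
              · exact Or.inl ((h2 q hcq).mp h)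
              · exact Or.inr (by simpa using h)
            · intro hq
              rcases hq with h | h
              · exact List.mem_append.mpr (Or.inl ((h2 q hcq).mpr h))
              · simp [h])]
        simp

-- matched = filter cond, and pvFull2 pairs matched = matched ++ rem (hypotheses discharged once)
theorem pvFull2_eq (cur_entity : String) (forward : Bool) (pairs : List (String × String)) :
    pvFull2 pairs (pairs.filter (pvCond cur_entity forward))
      = pairs.filter (pvCond cur_entity forward)
        ++ pvRemSpec (pvCond cur_entity forward) pairs PySem.Set.empty := by
  apply pvFull2_remSpec
  · intro p hp hc; exact List.mem_filter.mpr ⟨hp, hc⟩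
  · intro p hc
    constructor
    · intro hmem
      have := (List.mem_filter.mp hmem).2
      rw [hc] at this; exact absurd this (by simp)
    · intro h; exact absurd h (by simp [PySem.Set.empty])

-- ===== VERDICT (by name: the statements are the Claim_ definitions above) =====
theorem load_few_shot_spec : Claim_unchanged_load_few_shot := by
  intro cur_entity relation train_set count forward _ hpre hD
  unfold Pre_load_few_shot at hpre
  unfold D_load_few_shot at hD
  unfold load_few_shot load_few_shot_alt
  cases hget : (PySem.Dict.mk train_set).get? relation with
  | none => rfl
  | some pairs =>
    rw [hget] at hD
    simp only [Option.getD_some] at hD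
    simp only []
    rw [PySem.List.slice_to _ hpre]
    by_cases hnil : pairs = []
    · subst hnil
      simp [pvLoopA1, pvLoopA2, pvClassifyB]
    · have hpos : 1 ≤ count := by
        by_cases hc0 : count = 0
        · exact absurd ⟨hc0, hnil⟩ hD
        · omega
      rw [pvClassifyB_spec, pvLoopA1_spec]
      set cond := pvCond cur_entity forward with hcond
      set matched := List.filter cond pairs with hmatched
      set rem := pvRemSpec cond pairs PySem.Set.empty with hrem
      have hKn : count.toNat = pvK count 0 := by simp only [pvK]; omega
      simp only [List.length_nil, List.nil_append, hKn]
      by_cases h1 : pvK count 0 ≤ matched.length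
      · rw [if_pos h1]
        show List.take (pvK count 0) matched = List.take (pvK count 0) (matched ++ rem)
        rw [List.take_append_of_le_length h1]
      · rw [if_neg h1]
        show (match pvLoopA2 count pairs matched with | Sum.inl r => r | Sum.inr r => r)
          = List.take (pvK count 0) (matched ++ rem)
        rw [pvLoopA2_spec]
        have hfull : pvFull2 pairs matched = matched ++ rem := pvFull2_eq cur_entity forward pairs
        have hKeq : pvK count matched.length = pvK count 0 := by
          simp only [pvK] at h1 ⊢; omega
        rw [hfull, hKeq]
        by_cases h2 : pvK count 0 ≤ (matched ++ rem).length
        · rw [if_pos h2]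
        · rw [if_neg h2]
          show matched ++ rem = List.take (pvK count 0) (matched ++ rem)
          rw [List.take_of_length_le (by omega)]

theorem load_few_shot_changed : Claim_changed_load_few_shot := by
  unfold Claim_changed_load_few_shot; decide

theorem load_few_shot_tight : Claim_exact_load_few_shot := by
  intro cur_entity relation train_set count forward _ _ hD
  unfold D_load_few_shot at hD
  obtain ⟨hc0, hne⟩ := hD
  unfold load_few_shot load_few_shot_alt
  cases hget : (PySem.Dict.mk train_set).get? relation with
  | none => rw [hget] at hne; simp at hne
  | some pairs =>
    rw [hget] at hne
    simp only [Option.getD_some] at hne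
    simp only []
    subst hc0
    rw [PySem.List.slice_to _ le_rfl]
    rw [pvClassifyB_spec, pvLoopA1_spec]
    set cond := pvCond cur_entity forward with hcond
    set matched := List.filter cond pairs with hmatched
    set rem := pvRemSpec cond pairs PySem.Set.empty with hrem
    have hK1 : pvK 0 0 = 1 := by simp [pvK]
    simp only [List.length_nil, List.nil_append, hK1, Int.toNat_zero, List.take_zero]
    by_cases h1 : 1 ≤ matched.length
    · rw [if_pos h1]
      show List.take 1 matched ≠ []
      intro hcontra
      have := congrArg List.length hcontra
      rw [List.length_take] at this
      simp only [List.length_nil] at this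
      omega
    · rw [if_neg h1]
      have hm0 : matched = [] := List.eq_nil_of_length_eq_zero (by omega)
      obtain ⟨p, rest, hp⟩ := List.exists_cons_of_ne_nil hne
      have hlen : 1 ≤ (pvFull2 pairs matched).length := by
        rw [hm0, hp, pvFull2, if_neg (by simp)]
        simp only [List.nil_append]
        obtain ⟨s, hs⟩ := pvFull2_prefix rest [p]
        have := congrArg List.length hs
        simp at this
        omega
      show (match pvLoopA2 0 pairs matched with | Sum.inl r => r | Sum.inr r => r) ≠ []
      rw [pvLoopA2_spec]
      have hKm : pvK 0 matched.length = 1 := by rw [hm0]; simp [pvK]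
      rw [hKm, if_pos hlen]
      show List.take 1 (pvFull2 pairs matched) ≠ []
      intro hcontra
      have := congrArg List.length hcontra
      rw [List.length_take] at this
      simp only [List.length_nil] at this
      omega
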